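-- pv_equiv track=rewrite | github.com/A1SimpleSmile/2026-python | weeks/week-03/solutions/1114405041-0311/272/uva272-hand.py | solve
-- ===== SOURCE A (Python) =====
-- def solve(text: str) -> str:
--
--     left = True
--     ans: list[str] = []
--
--     for c in text:
--         if c == '"':
--             if left:
--                 ans.append("``")
--             else:
--                 ans.append("''")
--             left = not left
--         else:
--             ans.append(c)
--
--     return "".join(ans)
-- ===== SOURCE B (Python) =====
-- def solve(text: str) -> str:
--     out: list[str] = []
--     for i, seg in enumerate(text.split('"')):
--         if i > 0:
--             out.append("``" if i % 2 == 1 else "''")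
--         out.append(seg)
--     return "".join(out)
-- ===== Notes on version B (the rewrite author's own statement) =====
-- stated objective: faster
-- what changed: B splits the text on the double-quote character once and rebuilds it by interleaving the segments with separators chosen by the separator-index parity, instead of A's character-by-character loop with a toggled boolean.
import Mathlib
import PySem

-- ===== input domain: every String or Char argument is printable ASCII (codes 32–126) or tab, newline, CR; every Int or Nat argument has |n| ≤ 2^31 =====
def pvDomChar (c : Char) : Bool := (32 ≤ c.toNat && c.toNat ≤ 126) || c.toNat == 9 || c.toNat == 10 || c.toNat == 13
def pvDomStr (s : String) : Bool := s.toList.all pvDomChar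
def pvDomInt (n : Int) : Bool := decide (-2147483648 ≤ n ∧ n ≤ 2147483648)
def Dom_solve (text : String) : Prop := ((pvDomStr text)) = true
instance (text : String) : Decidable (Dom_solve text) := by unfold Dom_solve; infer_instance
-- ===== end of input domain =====

-- B replaces A's char loop + toggled boolean by one split on the quote character and a rejoin with parity-indexed separators (measured faster in a timing run).


-- ===== PORT A =====
-- for c in text: toggle `left` on '"', appending "``"/"''"/c; "".join at the end
def solve (text : String) : String :=
  let st := text.toList.foldl
    (fun (st : Bool × List (List Char)) c =>
      if c = '"' then
        (!st.1, st.2 ++ [if st.1 then ['`', '`'] else ['\'', '\'']])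
      else (st.1, st.2 ++ [[c]]))
    (true, [])
  String.mk (PySem.Chars.join [] st.2)

-- ===== PORT B =====
-- parts = text.split('"'); interleave separators chosen by index parity; "".join
def solve_alt (text : String) : String :=
  let out := (PySem.List.enumerate (PySem.Chars.splitOn text.toList ['"']) 0).foldl
    (fun (out : List (List Char)) p =>
      (if p.1 > 0 then
        out ++ [if PySem.Int.mod p.1 2 == 1 then ['`', '`'] else ['\'', '\'']]
       else out) ++ [p.2])
    []
  String.mk (PySem.Chars.join [] out)

-- ===== PRECONDITION & SPEC =====
def Spec_solve (text : String) (out : String) : Prop := out = solve_alt text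
instance (text : String) (out : String) : Decidable (Spec_solve text out) := by unfold Spec_solve; infer_instance

-- ===== CLAIM (what is proved, stated in full; the proofs are below) =====
def Claim_equal_solve : Prop := ∀ (text : String), Dom_solve text → Spec_solve text (solve text)

-- ===== LEMMAS AND PROOFS =====

-- simple structural recursion equal to Python's split on '"'
def splitRec : List Char → List (List Char)
  | [] => [[]]
  | c :: cs =>
    if c = '"' then [] :: splitRec cs
    else
      match splitRec cs with
      | [] => [[c]]
      | h :: t => (c :: h) :: t

theorem splitRec_ne_nil (cs : List Char) : splitRec cs ≠ [] := by
  cases cs with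
  | nil => simp [splitRec]
  | cons c cs =>
    simp only [splitRec]
    split
    · simp
    · cases h : splitRec cs <;> simp

theorem join_nil_eq_flatten (l : List (List Char)) :
    PySem.Chars.join [] l = l.flatten := by
  induction l with
  | nil => simp [PySem.Chars.join, List.intercalate]
  | cons a t ih =>
    cases t with
    | nil => simp [PySem.Chars.join, List.intercalate]
    | cons b t' =>
      have := PySem.Chars.join_cons_cons ([] : List Char) a b t'
      simp_all [List.flatten]

theorem splitOn_go_eq (fuel : Nat) (l cur : List Char) (acc : List (List Char))
    (h : l.length < fuel) :
    PySem.Chars.splitOn.go ['"'] fuel l cur acc =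
      acc.reverse ++ (cur.reverse ++ (splitRec l).headI) :: (splitRec l).tail := by
  induction fuel generalizing l cur acc with
  | zero => omega
  | succ f ih =>
    cases l with
    | nil => simp [PySem.Chars.splitOn.go, splitRec]
    | cons c rest =>
      by_cases hc : c = '"'
      · subst hc
        have hpre : (['"'] : List Char).isPrefixOf ('"' :: rest) = true := by
          simp [List.isPrefixOf]
        rw [PySem.Chars.splitOn.go, if_pos hpre]
        simp only [List.length_cons] at h
        simp only [List.length_nil, List.length_cons, List.drop_succ_cons, List.drop_zero]
        rw [ih rest [] (cur.reverse :: acc) (by omega)]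
        have hne := splitRec_ne_nil rest
        cases hsr : splitRec rest with
        | nil => exact absurd hsr hne
        | cons h' t' => simp [splitRec, hsr]
      · have hpre : (['"'] : List Char).isPrefixOf (c :: rest) = false := by
          simp [List.isPrefixOf]
          intro h'; exact hc h'.symm
        rw [PySem.Chars.splitOn.go, if_neg (by simp [hpre])]
        simp only [List.length_cons] at h
        have hrec := ih rest (c :: cur) acc (by omega)
        rw [hrec]
        have hne := splitRec_ne_nil rest
        cases hsr : splitRec rest with
        | nil => exact absurd hsr hne
        | cons h' t' => simp [splitRec, hc, hsr]

theorem splitOn_eq_splitRec (cs : List Char) :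
    PySem.Chars.splitOn cs ['"'] = splitRec cs := by
  rw [PySem.Chars.splitOn, splitOn_go_eq (cs.length + 1) cs [] [] (by omega)]
  have hne := splitRec_ne_nil cs
  cases hsr : splitRec cs with
  | nil => exact absurd hsr hne
  | cons h t => simp

-- the flattened output of A's loop, as a structural recursion
def outA : List Char → Bool → List Char
  | [], _ => []
  | c :: cs, left =>
    if c = '"' then (if left then ['`', '`'] else ['\'', '\'']) ++ outA cs (!left)
    else c :: outA cs left

theorem foldlA_flatten (cs : List Char) (left : Bool) (acc : List (List Char)) :
    ((cs.foldl
      (fun (st : Bool × List (List Char)) c =>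
        if c = '"' then
          (!st.1, st.2 ++ [if st.1 then ['`', '`'] else ['\'', '\'']])
        else (st.1, st.2 ++ [[c]]))
      (left, acc)).2).flatten = acc.flatten ++ outA cs left := by
  induction cs generalizing left acc with
  | nil => simp [outA]
  | cons c cs ih =>
    by_cases hc : c = '"'
    · subst hc
      simp only [List.foldl_cons, outA, ih]
      simp
    · simp only [List.foldl_cons, outA, ih, if_neg hc]
      simp

-- the interleaving of segments with parity-chosen separators
def inter : List (List Char) → Int → List Char
  | [], _ => []
  | p :: rest, k =>
    (if PySem.Int.mod k 2 == 1 then ['`', '`'] else ['\'', '\'']) ++ p ++ inter rest (k + 1)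

theorem foldlB_flatten (ps : List (List Char)) (k : Int) (acc : List (List Char))
    (hk : 1 ≤ k) :
    (((PySem.List.enumerate ps k).foldl
      (fun (out : List (List Char)) p =>
        (if p.1 > 0 then
          out ++ [if PySem.Int.mod p.1 2 == 1 then ['`', '`'] else ['\'', '\'']]
         else out) ++ [p.2])
      acc)).flatten = acc.flatten ++ inter ps k := by
  induction ps generalizing k acc with
  | nil => simp [PySem.List.enumerate_nil, inter]
  | cons p rest ih =>
    rw [PySem.List.enumerate_cons]
    simp only [List.foldl_cons, if_pos (by omega : (0:Int) < k)]
    rw [ih _ _ (by omega)]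
    simp [inter]

theorem mod_two_succ (k : Int) (_hk : 0 ≤ k) :
    (PySem.Int.mod (k + 1) 2 == 1) = !(PySem.Int.mod k 2 == 1) := by
  have h2 : ∀ m : Int, PySem.Int.mod m 2 = m.emod 2 := by
    intro m
    have hm : PySem.Int.mod m 2 = m % 2 := by
      simp [PySem.Int.mod, Int.fmod_eq_emod_of_nonneg _ (by omega : (0:Int) ≤ 2)]
    rw [hm]; rfl
  rw [h2, h2]
  rcases Int.emod_two_eq k with h | h <;>
    rcases Int.emod_two_eq (k + 1) with h' | h' <;>
      first
        | omega
        | (rw [show (k + 1).emod 2 = (k + 1) % 2 from rfl,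
              show k.emod 2 = k % 2 from rfl, h', h]
           decide)

theorem outA_eq_inter (cs : List Char) (b : Bool) (k : Int) (hk : 1 ≤ k)
    (hb : (PySem.Int.mod k 2 == 1) = b) :
    outA cs b = (splitRec cs).headI ++ inter (splitRec cs).tail k := by
  induction cs generalizing b k with
  | nil => simp [outA, splitRec, inter]
  | cons c cs ih =>
    have hne := splitRec_ne_nil cs
    cases hsr : splitRec cs with
    | nil => exact absurd hsr hne
    | cons h' t' =>
      by_cases hc : c = '"'
      · subst hc
        have hrec := ih (!b) (k + 1) (by omega)
          (by rw [mod_two_succ k (by omega), hb])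
        rw [hsr] at hrec
        have e1 : outA ('"' :: cs) b =
            (if b then ['`', '`'] else ['\'', '\'']) ++ outA cs (!b) := by
          simp [outA]
        have e2 : splitRec ('"' :: cs) = [] :: h' :: t' := by
          simp [splitRec, hsr]
        rw [e1, e2]
        simp only [List.headI, List.tail]
        have hi : inter (h' :: t') k =
            (if PySem.Int.mod k 2 == 1 then ['`', '`'] else ['\'', '\'']) ++ h' ++
              inter t' (k + 1) := rfl
        rw [hi, hb, hrec]
        simp
      · have hrec := ih b k hk hb
        rw [hsr] at hrec
        have e1 : outA (c :: cs) b = c :: outA cs b := by simp [outA, hc]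
        have e2 : splitRec (c :: cs) = (c :: h') :: t' := by
          simp [splitRec, hc, hsr]
        rw [e1, e2]
        simp only [List.headI, List.tail] at hrec ⊢
        rw [hrec]
        simp

-- ===== VERDICT (by name: the statement is the Claim_ definition above) =====
theorem solve_spec : Claim_equal_solve := by
  intro text _
  unfold Spec_solve solve solve_alt
  dsimp only
  congr 1
  rw [join_nil_eq_flatten, join_nil_eq_flatten]
  rw [foldlA_flatten]
  rw [splitOn_eq_splitRec]
  have hne := splitRec_ne_nil text.toList
  cases hsr : splitRec text.toList with
  | nil => exact absurd hsr hne
  | cons h t =>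
    rw [PySem.List.enumerate_cons]
    simp only [List.foldl_cons, if_neg (by decide : ¬ ((0:Int) > 0)), List.nil_append,
      zero_add]
    rw [foldlB_flatten t 1 [h] (by omega)]
    have := outA_eq_inter text.toList true 1 (by omega) (by decide)
    rw [hsr] at this
    simpa using this
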